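-- pv_equiv track=rewrite | github.com/bear-obscurus/Evidora | website/backend/tools/stress_test.py | verdict_matches
-- ===== SOURCE A (Python) =====
-- def verdict_matches(verdict: str | None, expected: list[str]) -> bool:
--     """Apply the false<->mostly_false / true<->mostly_true tolerance."""
--     if not expected:
--         return True  # no expectation set
--     if verdict in expected:
--         return True
--     pairs = [{"false", "mostly_false"}, {"true", "mostly_true"}]
--     for pair in pairs:
--         if verdict in pair and any(e in pair for e in expected):
--             return True
--     return False
-- ===== SOURCE B (Python) =====
-- _NORM = {"mostly_false": "false", "mostly_true": "true"}
--
-- def verdict_matches(verdict, expected):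
--     if not expected:
--         return True  # no expectation set
--     norm = lambda v: _NORM.get(v, v) if isinstance(v, str) else v
--     nv = norm(verdict)
--     return any(nv == norm(e) for e in expected)
-- ===== Notes on version B (the rewrite author's own statement) =====
-- stated objective: simpler
-- what changed: Replaces the membership test plus a scan over hardcoded tolerance-pair sets with a single pass comparing canonical tokens under a normalization map (mostly_false->false, mostly_true->true).
import Mathlib
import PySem

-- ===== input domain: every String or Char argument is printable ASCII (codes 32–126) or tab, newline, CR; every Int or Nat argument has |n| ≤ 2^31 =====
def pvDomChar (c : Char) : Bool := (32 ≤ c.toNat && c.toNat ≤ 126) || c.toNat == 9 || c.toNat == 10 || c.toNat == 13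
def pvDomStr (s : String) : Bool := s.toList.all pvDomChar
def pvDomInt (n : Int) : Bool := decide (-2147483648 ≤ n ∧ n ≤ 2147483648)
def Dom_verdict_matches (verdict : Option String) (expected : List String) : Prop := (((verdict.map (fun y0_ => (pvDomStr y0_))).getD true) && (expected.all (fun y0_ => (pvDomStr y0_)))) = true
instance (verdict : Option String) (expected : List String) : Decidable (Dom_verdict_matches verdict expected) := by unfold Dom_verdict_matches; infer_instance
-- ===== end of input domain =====

-- B replaces A's membership test + scan over hardcoded tolerance-pair sets with a
-- single pass comparing normalized canonical tokens (objective: simpler).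

-- ===== PORT A =====
-- 'verdict in xs' for an Option verdict: None is never equal to a str element.
def pyOptIn (verdict : Option String) (xs : List String) : Bool :=
  match verdict with
  | some v => xs.contains v
  | none => false

def verdict_matches (verdict : Option String) (expected : List String) : Bool :=
  if expected = [] then true
  else if pyOptIn verdict expected then true
  else
    -- pairs = [{"false","mostly_false"}, {"true","mostly_true"}]; for-loop with early return = List.any
    let pairs : List (List String) := [["false", "mostly_false"], ["true", "mostly_true"]]
    pairs.any (fun pair => pyOptIn verdict pair && expected.any (fun e => pair.contains e))

-- ===== PORT B =====
def vmNorm (s : String) : String :=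
  if s = "mostly_false" then "false" else if s = "mostly_true" then "true" else s

def verdict_matches_alt (verdict : Option String) (expected : List String) : Bool :=
  if expected = [] then true
  else expected.any (fun e => verdict.map vmNorm == some (vmNorm e))

-- ===== PRECONDITION & SPEC =====
def Spec_verdict_matches (verdict : Option String) (expected : List String) (out : Bool) : Prop := out = verdict_matches_alt verdict expected
instance (verdict : Option String) (expected : List String) (out : Bool) : Decidable (Spec_verdict_matches verdict expected out) := by unfold Spec_verdict_matches; infer_instance

-- ===== CLAIM (what is proved, stated in full; the proofs are below) =====
def Claim_equal_verdict_matches : Prop := ∀ (verdict : Option String) (expected : List String), Dom_verdict_matches verdict expected → Spec_verdict_matches verdict expected (verdict_matches verdict expected)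

-- ===== LEMMAS AND PROOFS =====

-- per-element bridge: A's "equal, or both in the same tolerance pair" is exactly
-- equality of normalized tokens
lemma vmNorm_eq_iff (v e : String) :
    (v = e ∨ ((v = "false" ∨ v = "mostly_false") ∧ (e = "false" ∨ e = "mostly_false")) ∨
      ((v = "true" ∨ v = "mostly_true") ∧ (e = "true" ∨ e = "mostly_true"))) ↔ vmNorm v = vmNorm e := by
  unfold vmNorm
  by_cases h1 : v = "mostly_false" <;> by_cases h2 : v = "mostly_true" <;>
    by_cases h3 : e = "mostly_false" <;> by_cases h4 : e = "mostly_true" <;>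
    simp_all <;> aesop

theorem verdict_matches_spec : Claim_equal_verdict_matches := by
  intro verdict expected _
  unfold Spec_verdict_matches verdict_matches verdict_matches_alt
  by_cases he : expected = []
  · simp [he]
  · simp only [he, if_false]
    cases verdict with
    | none => simp [pyOptIn]
    | some v =>
      simp only [pyOptIn, List.any_cons, List.any_nil, Bool.or_false, Option.map_some]
      rw [show (if expected.contains v = true then true
          else (List.contains ["false", "mostly_false"] v && expected.any fun e => List.contains ["false", "mostly_false"] e) ||
            (List.contains ["true", "mostly_true"] v && expected.any fun e => List.contains ["true", "mostly_true"] e)) =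
          (expected.contains v ||
            ((List.contains ["false", "mostly_false"] v && expected.any fun e => List.contains ["false", "mostly_false"] e) ||
            (List.contains ["true", "mostly_true"] v && expected.any fun e => List.contains ["true", "mostly_true"] e)))
        from by by_cases h : expected.contains v = true <;> simp_all]
      apply Bool.eq_iff_iff.mpr
      simp only [Bool.or_eq_true, Bool.and_eq_true, List.any_eq_true, List.contains_eq_mem,
        decide_eq_true_eq, List.mem_cons, List.not_mem_nil, or_false, beq_iff_eq,
        Option.some.injEq]
      constructor
      · rintro (h | ⟨hv, e, he', hp⟩ | ⟨hv, e, he', hp⟩)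
        · exact ⟨v, h, (vmNorm_eq_iff v v).mp (Or.inl rfl)⟩
        · exact ⟨e, he', (vmNorm_eq_iff v e).mp (Or.inr (Or.inl ⟨hv, hp⟩))⟩
        · exact ⟨e, he', (vmNorm_eq_iff v e).mp (Or.inr (Or.inr ⟨hv, hp⟩))⟩
      · rintro ⟨e, he', hn⟩
        rcases (vmNorm_eq_iff v e).mpr hn with h | ⟨hv, hp⟩ | ⟨hv, hp⟩
        · subst h; exact Or.inl he'
        · exact Or.inr (Or.inl ⟨hv, e, he', hp⟩)
        · exact Or.inr (Or.inr ⟨hv, e, he', hp⟩)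

-- ===== VERDICT (by name: the statement is the Claim_ definition above) =====
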